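-- pv_equiv track=rewrite | github.com/monotributistar/tradingPano | api/routers/market.py | _suggest_strategies
-- ===== SOURCE A (Python) =====
-- from typing import Any, Dict, List, Optional
--
-- def _suggest_strategies(
--     market_type: str,
--     trend_direction: str,
--     volatility: str,
--     timeframe: str,
-- ) -> List[Dict[str, str]]:
--     """Return top-3 strategy suggestions with a one-line reason each.
--
--     Args:
--         market_type:     "trending" | "ranging" | "mixed"
--         trend_direction: "up" | "down" | "sideways"
--         volatility:      "low" | "medium" | "high"
--         timeframe:       "1h" | "4h" etc.
--     """
--     candidates: List[Dict[str, str]] = []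
--
--     if market_type == "trending" and trend_direction == "up":
--         candidates = [
--             {"name": "supertrend_pro",   "reason": "Strong uptrend — dual Supertrend + ADX confirms trend"},
--             {"name": "trend_following",  "reason": "ADX uptrend — follow momentum with EMA filter"},
--             {"name": "macd_rsi",         "reason": "Bullish momentum confirmed — MACD/RSI confluence"},
--             {"name": "momentum_burst",   "reason": "Price breaking out — capture the impulse move"},
--             {"name": "ema_crossover",    "reason": "Golden cross regime — EMA trend following"},
--         ]
--     elif market_type == "trending" and trend_direction == "down":
--         candidates = [
--             {"name": "trend_following_ls", "reason": "Downtrend confirmed — short bias futures strategy"},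
--             {"name": "supertrend_pro",     "reason": "Bearish Supertrend flip — short with trailing stop"},
--             {"name": "momentum_burst",     "reason": "Short momentum — captures the sell-off impulse"},
--             {"name": "macd_rsi",           "reason": "Bearish MACD divergence — high-quality short signal"},
--         ]
--     elif market_type == "ranging":
--         candidates = [
--             {"name": "rsi_mean_revert",   "reason": "Sideways market — RSI extremes are reliable signals"},
--             {"name": "bb_squeeze",        "reason": "Volatility compressed — mean reversion on band touches"},
--             {"name": "vwap_bounce",       "reason": "Range-bound — VWAP deviations snap back quickly"},
--             {"name": "grid_dynamic",      "reason": "Flat market — grid harvests oscillation profit"},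
--             {"name": "mean_reversion",    "reason": "No trend — statistical reversion from extremes"},
--         ]
--     else:  # mixed / transitional
--         candidates = [
--             {"name": "stoch_rsi",    "reason": "Mixed signals — StochRSI handles both regimes well"},
--             {"name": "macd_rsi",     "reason": "Dual-filter reduces false signals in choppy conditions"},
--             {"name": "bb_squeeze",   "reason": "Compression before expansion — volatility timing play"},
--             {"name": "scalping",     "reason": "Short duration reduces directional exposure"},
--         ]
--
--     # Promote high-volatility burst strategies when vol is elevated
--     if volatility == "high":
--         hv_boost = ["momentum_burst", "breakout", "bb_squeeze", "scalping"]
--         boosted = [c for c in candidates if c["name"] in hv_boost]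
--         rest = [c for c in candidates if c["name"] not in hv_boost]
--         candidates = boosted + rest
--
--     # Promote slow strategies for very short timeframes (avoid over-trading)
--     if timeframe in ("15m", "30m"):
--         scalp_first = ["scalping", "vwap_bounce", "momentum_burst"]
--         first = [c for c in candidates if c["name"] in scalp_first]
--         rest = [c for c in candidates if c["name"] not in scalp_first]
--         candidates = first + rest
--
--     seen: set = set()
--     result: List[Dict[str, str]] = []
--     for c in candidates:
--         if c["name"] not in seen:
--             seen.add(c["name"])
--             result.append(c)
--         if len(result) == 3:
--             break
--
--     return result
-- ===== SOURCE B (Python) =====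
-- from typing import Any, Dict, List, Optional
--
--
-- def _suggest_strategies(
--     market_type: str,
--     trend_direction: str,
--     volatility: str,
--     timeframe: str,
-- ) -> List[Dict[str, str]]:
--     """Same suggestions as the original, but the two stable partition passes
--     are replaced by one stable sort on a priority rank."""
--     if market_type == "trending" and trend_direction == "up":
--         candidates = [
--             {"name": "supertrend_pro",   "reason": "Strong uptrend — dual Supertrend + ADX confirms trend"},
--             {"name": "trend_following",  "reason": "ADX uptrend — follow momentum with EMA filter"},
--             {"name": "macd_rsi",         "reason": "Bullish momentum confirmed — MACD/RSI confluence"},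
--             {"name": "momentum_burst",   "reason": "Price breaking out — capture the impulse move"},
--             {"name": "ema_crossover",    "reason": "Golden cross regime — EMA trend following"},
--         ]
--     elif market_type == "trending" and trend_direction == "down":
--         candidates = [
--             {"name": "trend_following_ls", "reason": "Downtrend confirmed — short bias futures strategy"},
--             {"name": "supertrend_pro",     "reason": "Bearish Supertrend flip — short with trailing stop"},
--             {"name": "momentum_burst",     "reason": "Short momentum — captures the sell-off impulse"},
--             {"name": "macd_rsi",           "reason": "Bearish MACD divergence — high-quality short signal"},
--         ]
--     elif market_type == "ranging":
--         candidates = [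
--             {"name": "rsi_mean_revert",   "reason": "Sideways market — RSI extremes are reliable signals"},
--             {"name": "bb_squeeze",        "reason": "Volatility compressed — mean reversion on band touches"},
--             {"name": "vwap_bounce",       "reason": "Range-bound — VWAP deviations snap back quickly"},
--             {"name": "grid_dynamic",      "reason": "Flat market — grid harvests oscillation profit"},
--             {"name": "mean_reversion",    "reason": "No trend — statistical reversion from extremes"},
--         ]
--     else:  # mixed / transitional
--         candidates = [
--             {"name": "stoch_rsi",    "reason": "Mixed signals — StochRSI handles both regimes well"},
--             {"name": "macd_rsi",     "reason": "Dual-filter reduces false signals in choppy conditions"},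
--             {"name": "bb_squeeze",   "reason": "Compression before expansion — volatility timing play"},
--             {"name": "scalping",     "reason": "Short duration reduces directional exposure"},
--         ]
--
--     hv = volatility == "high"
--     fast = timeframe in ("15m", "30m")
--
--     def rank(c):
--         # timeframe promotion is applied last in the spec, so it is the most
--         # significant key; the sort is stable, so original order breaks ties
--         tf_rank = 0 if fast and c["name"] in ("scalping", "vwap_bounce", "momentum_burst") else 1
--         vol_rank = 0 if hv and c["name"] in ("momentum_burst", "breakout", "bb_squeeze", "scalping") else 1
--         return 2 * tf_rank + vol_rank
--
--     ordered = sorted(candidates, key=rank)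
--
--     result: List[Dict[str, str]] = []
--     names: set = set()
--     for c in ordered:
--         if c["name"] not in names:
--             names.add(c["name"])
--             result.append(c)
--             if len(result) == 3:
--                 break
--     return result
-- ===== Notes on version B (the rewrite author's own statement) =====
-- stated objective: simpler
-- what changed: The two stable partition passes (volatility boost, then timeframe promotion) are replaced by one stable sort on a combined priority rank (timeframe most significant), followed by the same dedup/top-3 scan.
import Mathlib
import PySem

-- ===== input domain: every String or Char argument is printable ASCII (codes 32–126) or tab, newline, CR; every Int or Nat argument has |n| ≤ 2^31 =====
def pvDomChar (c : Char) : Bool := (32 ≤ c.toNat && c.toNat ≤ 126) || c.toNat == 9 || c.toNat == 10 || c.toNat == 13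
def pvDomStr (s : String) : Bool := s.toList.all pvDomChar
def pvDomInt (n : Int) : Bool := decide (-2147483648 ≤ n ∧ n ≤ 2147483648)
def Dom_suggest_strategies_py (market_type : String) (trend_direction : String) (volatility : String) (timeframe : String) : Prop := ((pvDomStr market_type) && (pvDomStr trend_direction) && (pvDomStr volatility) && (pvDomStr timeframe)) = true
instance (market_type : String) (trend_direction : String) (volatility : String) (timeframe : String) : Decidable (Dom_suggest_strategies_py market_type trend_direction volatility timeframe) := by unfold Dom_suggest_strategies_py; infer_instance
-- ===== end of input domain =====

-- B replaces A's two stable partition passes by one stable sort on a priority rank (simpler decomposition, same result).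

-- shared literal data: the candidate lists of the four branches (a dict is an assoc list)
def pvCand (n r : String) : List (String × String) := [("name", n), ("reason", r)]
-- c["name"]: first-match assoc-list lookup (exact: the key is always present in these literal dicts)
def pvName (c : List (String × String)) : String := (List.lookup "name" c).getD ""

def pvCandsUp : List (List (String × String)) :=
  [pvCand "supertrend_pro" "Strong uptrend — dual Supertrend + ADX confirms trend",
   pvCand "trend_following" "ADX uptrend — follow momentum with EMA filter",
   pvCand "macd_rsi" "Bullish momentum confirmed — MACD/RSI confluence",
   pvCand "momentum_burst" "Price breaking out — capture the impulse move",
   pvCand "ema_crossover" "Golden cross regime — EMA trend following"]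
def pvCandsDown : List (List (String × String)) :=
  [pvCand "trend_following_ls" "Downtrend confirmed — short bias futures strategy",
   pvCand "supertrend_pro" "Bearish Supertrend flip — short with trailing stop",
   pvCand "momentum_burst" "Short momentum — captures the sell-off impulse",
   pvCand "macd_rsi" "Bearish MACD divergence — high-quality short signal"]
def pvCandsRanging : List (List (String × String)) :=
  [pvCand "rsi_mean_revert" "Sideways market — RSI extremes are reliable signals",
   pvCand "bb_squeeze" "Volatility compressed — mean reversion on band touches",
   pvCand "vwap_bounce" "Range-bound — VWAP deviations snap back quickly",
   pvCand "grid_dynamic" "Flat market — grid harvests oscillation profit",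
   pvCand "mean_reversion" "No trend — statistical reversion from extremes"]
def pvCandsMixed : List (List (String × String)) :=
  [pvCand "stoch_rsi" "Mixed signals — StochRSI handles both regimes well",
   pvCand "macd_rsi" "Dual-filter reduces false signals in choppy conditions",
   pvCand "bb_squeeze" "Compression before expansion — volatility timing play",
   pvCand "scalping" "Short duration reduces directional exposure"]

-- ===== PORT A =====
-- A's dedup loop: append on first occurrence of the name, break when the result reaches 3
def pvLoopA : List (List (String × String)) → PySem.Set String → List (List (String × String)) → List (List (String × String))
  | [], _, result => result
  | c :: rest, seen, result =>
    let p := if ¬ (PySem.Set.contains seen (pvName c)) then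
               (PySem.Set.add seen (pvName c), result ++ [c])
             else (seen, result)
    if p.2.length == 3 then p.2 else pvLoopA rest p.1 p.2

def suggest_strategies_py (market_type : String) (trend_direction : String) (volatility : String) (timeframe : String) : List (List (String × String)) :=
  let candidates :=
    if market_type == "trending" && trend_direction == "up" then pvCandsUp
    else if market_type == "trending" && trend_direction == "down" then pvCandsDown
    else if market_type == "ranging" then pvCandsRanging
    else pvCandsMixed
  let candidates :=
    if volatility == "high" then
      let hv_boost := ["momentum_burst", "breakout", "bb_squeeze", "scalping"]
      let boosted := candidates.filter (fun c => hv_boost.contains (pvName c))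
      let rest := candidates.filter (fun c => ¬ hv_boost.contains (pvName c))
      boosted ++ rest
    else candidates
  let candidates :=
    if timeframe == "15m" || timeframe == "30m" then
      let scalp_first := ["scalping", "vwap_bounce", "momentum_burst"]
      let first := candidates.filter (fun c => scalp_first.contains (pvName c))
      let rest := candidates.filter (fun c => ¬ scalp_first.contains (pvName c))
      first ++ rest
    else candidates
  pvLoopA candidates PySem.Set.empty []

-- ===== PORT B =====
def pvRank (hv fast : Bool) (c : List (String × String)) : Nat :=
  let tf_rank := if fast && ["scalping", "vwap_bounce", "momentum_burst"].contains (pvName c) then 0 else 1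
  let vol_rank := if hv && ["momentum_burst", "breakout", "bb_squeeze", "scalping"].contains (pvName c) then 0 else 1
  2 * tf_rank + vol_rank

-- B's dedup loop: break moved inside the append branch
def pvLoopB : List (List (String × String)) → PySem.Set String → List (List (String × String)) → List (List (String × String))
  | [], _, result => result
  | c :: rest, names, result =>
    if ¬ (PySem.Set.contains names (pvName c)) then
      let names' := PySem.Set.add names (pvName c)
      let result' := result ++ [c]
      if result'.length == 3 then result' else pvLoopB rest names' result'
    else pvLoopB rest names result

def suggest_strategies_py_alt (market_type : String) (trend_direction : String) (volatility : String) (timeframe : String) : List (List (String × String)) :=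
  let candidates :=
    if market_type == "trending" && trend_direction == "up" then pvCandsUp
    else if market_type == "trending" && trend_direction == "down" then pvCandsDown
    else if market_type == "ranging" then pvCandsRanging
    else pvCandsMixed
  let hv := volatility == "high"
  let fast := timeframe == "15m" || timeframe == "30m"
  let ordered := PySem.List.sorted candidates (pvRank hv fast) false
  pvLoopB ordered PySem.Set.empty []

-- ===== PRECONDITION & SPEC =====
def Spec_suggest_strategies_py (market_type : String) (trend_direction : String) (volatility : String) (timeframe : String) (out : List (List (String × String))) : Prop := out = suggest_strategies_py_alt market_type trend_direction volatility timeframe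
instance (market_type : String) (trend_direction : String) (volatility : String) (timeframe : String) (out : List (List (String × String))) : Decidable (Spec_suggest_strategies_py market_type trend_direction volatility timeframe out) := by unfold Spec_suggest_strategies_py; infer_instance

-- ===== CLAIM (what is proved, stated in full; the proofs are below) =====
def Claim_equal_suggest_strategies_py : Prop := ∀ (market_type : String) (trend_direction : String) (volatility : String) (timeframe : String), Dom_suggest_strategies_py market_type trend_direction volatility timeframe → Spec_suggest_strategies_py market_type trend_direction volatility timeframe (suggest_strategies_py market_type trend_direction volatility timeframe)

-- ===== LEMMAS AND PROOFS =====

-- ===== VERDICT (by name: the statement is the Claim_ definition above) =====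
theorem suggest_strategies_py_spec : Claim_equal_suggest_strategies_py := by
  intro mt td v tf _
  unfold Spec_suggest_strategies_py suggest_strategies_py suggest_strategies_py_alt
  rcases Bool.eq_false_or_eq_true (mt == "trending" && td == "up") with h1 | h1 <;>
    rcases Bool.eq_false_or_eq_true (mt == "trending" && td == "down") with h2 | h2 <;>
    rcases Bool.eq_false_or_eq_true (mt == "ranging") with h3 | h3 <;>
    rcases Bool.eq_false_or_eq_true (v == "high") with h4 | h4 <;>
    rcases Bool.eq_false_or_eq_true (tf == "15m" || tf == "30m") with h5 | h5 <;>
    simp only [h1, h2, h3, h4, h5] <;> decide
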